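-- pv_equiv track=rewrite | github.com/kgryczan/excelbi_puzzles | Excel/400-499/448/448 Challenge.py | create_sequence_matrix
-- ===== SOURCE A (Python) =====
-- def create_sequence_matrix(n):
--     total_elements = n * (n + 1) // 2
--     max_elements_in_row = n
--     values = list(range(1, total_elements + 1))
--     mat = [[None] * max_elements_in_row for _ in range(n)]
--     start_index = 0
--     for i in range(n):
--         end_index = start_index + i
--         mat[i][:i+1] = values[start_index:end_index+1]
--         start_index = end_index + 1
--     return mat
-- ===== SOURCE B (Python) =====
-- def create_sequence_matrix(n):
--     # Each cell's value is computed from its (i, j) position via the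
--     # triangular-number formula, with no prebuilt flat value list or cursor.
--     result = []
--     for i in range(n):
--         base = i * (i + 1) // 2
--         result.append([base + j + 1 for j in range(i + 1)] + [None] * (n - i - 1))
--     return result
-- ===== Notes on version B (the rewrite author's own statement) =====
-- stated objective: simpler
-- what changed: Replaced the prebuilt flat value list, preallocated None-matrix and start/end-index cursor with a single loop that computes each row's values directly from the triangular-number formula for its row index and pads the row in place.
import Mathlib
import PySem

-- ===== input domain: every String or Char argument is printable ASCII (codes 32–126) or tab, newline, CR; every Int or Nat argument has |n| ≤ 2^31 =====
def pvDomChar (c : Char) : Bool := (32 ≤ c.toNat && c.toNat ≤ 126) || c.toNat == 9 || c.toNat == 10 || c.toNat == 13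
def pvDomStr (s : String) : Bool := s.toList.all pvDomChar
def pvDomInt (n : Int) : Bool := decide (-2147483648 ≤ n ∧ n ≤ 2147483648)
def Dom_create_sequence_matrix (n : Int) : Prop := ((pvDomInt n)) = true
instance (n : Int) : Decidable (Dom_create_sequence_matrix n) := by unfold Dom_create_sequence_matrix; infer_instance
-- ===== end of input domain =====

-- B drops A's prebuilt flat value list and index cursor and computes each row
-- from the triangular-number formula; objective: simpler (same return value).

-- ===== PORT A =====
def create_sequence_matrix (n : Int) : List (List (Option Int)) :=
  let total_elements := PySem.Int.floordiv (n * (n + 1)) 2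
  let max_elements_in_row := n
  let values := PySem.List.pyRange 1 (total_elements + 1) 1
  let mat : List (List (Option Int)) :=
    (PySem.List.pyRange 0 n 1).map
      (fun _ => PySem.List.pyRepeat [(none : Option Int)] max_elements_in_row)
  let st :=
    (PySem.List.pyRange 0 n 1).foldl
      (fun (st : List (List (Option Int)) × Int) i =>
        let mat := st.1
        let start_index := st.2
        let end_index := start_index + i
        -- mat[i][:i+1] = values[start_index:end_index+1]: slice assignment replaces
        -- the first i+1 elements of row i; exact for 0 ≤ i < len(mat), which holds
        -- in this loop; ints entering the Option-typed matrix are wrapped in `some`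
        let row := mat.getD i.toNat []
        let row' :=
          (PySem.List.slice values (some start_index) (some (end_index + 1))).map some
            ++ PySem.List.slice row (some (i + 1)) none
        (mat.set i.toNat row', end_index + 1))
      (mat, 0)
  st.1

-- ===== PORT B =====
def create_sequence_matrix_alt (n : Int) : List (List (Option Int)) :=
  (PySem.List.pyRange 0 n 1).foldl
    (fun (result : List (List (Option Int))) i =>
      let base := PySem.Int.floordiv (i * (i + 1)) 2
      result ++ [((PySem.List.pyRange 0 (i + 1) 1).map (fun j => some (base + j + 1)))
                 ++ PySem.List.pyRepeat [(none : Option Int)] (n - i - 1)])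
    []

-- ===== PRECONDITION & SPEC =====
def Spec_create_sequence_matrix (n : Int) (out : List (List (Option Int))) : Prop := out = create_sequence_matrix_alt n
instance (n : Int) (out : List (List (Option Int))) : Decidable (Spec_create_sequence_matrix n out) := by unfold Spec_create_sequence_matrix; infer_instance

-- ===== CLAIM (what is proved, stated in full; the proofs are below) =====
def Claim_equal_create_sequence_matrix : Prop := ∀ (n : Int), Dom_create_sequence_matrix n → Spec_create_sequence_matrix n (create_sequence_matrix n)

-- ===== LEMMAS AND PROOFS =====

def pvTri : Nat → Nat
  | 0 => 0
  | m+1 => pvTri m + (m+1)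

theorem pvTri_two (m : Nat) : 2 * pvTri m = m * (m + 1) := by
  induction m with
  | zero => rfl
  | succ k ih => simp [pvTri, Nat.mul_add, ih]; ring

theorem pvTri_mono {a b : Nat} (h : a ≤ b) : pvTri a ≤ pvTri b := by
  induction h with
  | refl => exact le_refl _
  | step h ih => exact le_trans ih (by simp [pvTri])

theorem pvTri_cast (m : Nat) :
    PySem.Int.floordiv ((m : Int) * ((m : Int) + 1)) 2 = (pvTri m : Int) := by
  have h2 : ((m : Int) * ((m : Int) + 1)) = 2 * (pvTri m : Int) := by
    have h := congrArg (fun k : Nat => (k : Int)) (pvTri_two m)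
    push_cast at h
    linarith
  rw [h2, PySem.Int.floordiv_eq_ediv_of_pos (by norm_num),
    Int.mul_ediv_cancel_left _ (by norm_num)]

theorem pvGetD_mid {α : Type} (l1 l2 : List α) (x d : α) :
    (l1 ++ x :: l2).getD l1.length d = x := by
  induction l1 with
  | nil => rfl
  | cons a t ih => simp

theorem pvSet_mid {α : Type} (l1 l2 : List α) (x y : α) :
    (l1 ++ x :: l2).set l1.length y = l1 ++ y :: l2 := by
  induction l1 with
  | nil => rfl
  | cons a t ih => simp

theorem pvMap_const {α β : Type} (l : List α) (c : β) :
    l.map (fun _ => c) = List.replicate l.length c := by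
  induction l with
  | nil => rfl
  | cons a t ih => simp [List.replicate, ih]

theorem pvSlice_values (N m : Nat) (h : m < N) :
    ((PySem.List.slice (PySem.List.pyRange 1 ((pvTri N : Int) + 1) 1)
        (some (pvTri m : Int)) (some ((pvTri m : Int) + (m : Int) + 1))).map some)
      = (List.range (m + 1)).map (fun (j : Nat) => some ((pvTri m : Int) + (j : Int) + 1)) := by
  have hb : (pvTri m : Int) + (m : Int) + 1 = (pvTri m : Int) + ((m + 1 : Nat) : Int) := by
    push_cast; ring
  rw [hb, PySem.List.slice_natCast_add, PySem.List.pyRange_one]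
  have hn : ((pvTri N : Int) + 1 - 1).toNat = pvTri N := by omega
  rw [hn]
  have hle : pvTri m + (m + 1) ≤ pvTri N := by
    have := pvTri_mono h
    simpa [pvTri] using this
  apply List.ext_getElem
  · simp; omega
  · intro k hk1 hk2
    simp only [List.getElem_map, List.getElem_take, List.getElem_drop, List.getElem_range]
    congr 1
    push_cast
    ring

def pvRows (N m : Nat) : List (List (Option Int)) :=
  (List.range m).map (fun (k : Nat) =>
    (List.range (k + 1)).map (fun (j : Nat) => some ((pvTri k : Int) + (j : Int) + 1))
      ++ List.replicate (N - k - 1) (none : Option Int))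

theorem pvLoopA (N : Nat) : ∀ m : Nat, m ≤ N →
    (PySem.List.pyRange 0 (m : Int) 1).foldl
      (fun (st : List (List (Option Int)) × Int) i =>
        (st.1.set i.toNat
            ((PySem.List.slice (PySem.List.pyRange 1 ((pvTri N : Int) + 1) 1)
                (some st.2) (some (st.2 + i + 1))).map some
              ++ PySem.List.slice (st.1.getD i.toNat []) (some (i + 1)) none),
         st.2 + i + 1))
      (List.replicate N (List.replicate N (none : Option Int)), 0)
    = (pvRows N m ++ List.replicate (N - m) (List.replicate N (none : Option Int)),
       (pvTri m : Int)) := by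
  intro m
  induction m with
  | zero =>
    intro _
    simp [pvRows, pvTri, PySem.List.pyRange_one_eq_nil (le_refl (0 : Int))]
  | succ m ih =>
    intro h
    have hmN : m < N := h
    have hc : ((m + 1 : Nat) : Int) = (m : Int) + 1 := by push_cast; ring
    rw [hc, show PySem.List.pyRange 0 ((m : Int) + 1) 1
          = PySem.List.pyRange 0 (m : Int) 1 ++ [(m : Int)] from
        PySem.List.pyRange_one_succ_right (by positivity),
      List.foldl_append, ih (le_of_lt hmN)]
    simp only [List.foldl_cons, List.foldl_nil, Int.toNat_natCast]
    have hrep : N - m = (N - m - 1) + 1 := by omega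
    rw [hrep, List.replicate_succ]
    have hlen : (pvRows N m).length = m := by simp [pvRows]
    have hg : (pvRows N m ++ List.replicate N (none : Option Int)
        :: List.replicate (N - m - 1) (List.replicate N (none : Option Int))).getD m []
        = List.replicate N (none : Option Int) := by
      have := pvGetD_mid (pvRows N m)
        (List.replicate (N - m - 1) (List.replicate N (none : Option Int)))
        (List.replicate N (none : Option Int)) []
      rwa [hlen] at this
    rw [hg, pvSlice_values N m hmN,
      show (m : Int) + 1 = ((m + 1 : Nat) : Int) from by push_cast; ring,
      PySem.List.slice_from_natCast, List.drop_replicate]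
    have hset := pvSet_mid (pvRows N m)
      (List.replicate (N - m - 1) (List.replicate N (none : Option Int)))
      (List.replicate N (none : Option Int))
      ((List.range (m + 1)).map (fun (j : Nat) => some ((pvTri m : Int) + (j : Int) + 1))
        ++ List.replicate (N - (m + 1)) (none : Option Int))
    rw [hlen] at hset
    rw [hset]
    rw [Prod.mk.injEq]
    constructor
    · rw [show N - (m + 1) = N - m - 1 from by omega]
      conv_rhs => rw [pvRows, List.range_succ, List.map_append]
      simp [pvRows]
    · simp [pvTri]
      ring

theorem pvAlt_eq (N : Nat) : create_sequence_matrix_alt (N : Int) = pvRows N N := by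
  unfold create_sequence_matrix_alt
  simp only [PySem.List.foldl_append_singleton_eq_map, List.nil_append]
  rw [PySem.List.pyRange_one]
  have : ((N : Int) - 0).toNat = N := by omega
  rw [this, List.map_map, pvRows]
  apply List.map_congr_left
  intro k hk
  have hkN : k < N := List.mem_range.mp hk
  simp only [Function.comp_apply, zero_add]
  rw [pvTri_cast, PySem.List.pyRange_one, PySem.List.pyRepeat_singleton]
  have h1 : ((k : Int) + 1 - 0).toNat = k + 1 := by omega
  have h2 : ((N : Int) - (k : Int) - 1).toNat = N - k - 1 := by omega
  rw [h1, h2, List.map_map]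
  congr 1
  apply List.map_congr_left
  intro j _
  simp

theorem pvA_eq (N : Nat) : create_sequence_matrix (N : Int) = pvRows N N := by
  unfold create_sequence_matrix
  simp only []
  rw [pvTri_cast N, PySem.List.pyRepeat_singleton, Int.toNat_natCast]
  have hmat : (PySem.List.pyRange 0 (N : Int) 1).map
      (fun _ => List.replicate N (none : Option Int))
      = List.replicate N (List.replicate N (none : Option Int)) := by
    rw [pvMap_const, PySem.List.length_pyRange_one]
    norm_num
  rw [hmat, pvLoopA N N (le_refl N)]
  simp

-- ===== VERDICT (by name: the statement is the Claim_ definition above) =====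
theorem create_sequence_matrix_spec : Claim_equal_create_sequence_matrix := by
  intro n _
  unfold Spec_create_sequence_matrix
  by_cases hn : 0 ≤ n
  · obtain ⟨N, rfl⟩ := Int.eq_ofNat_of_zero_le hn
    rw [pvA_eq, pvAlt_eq]
  · have he : PySem.List.pyRange 0 n 1 = [] :=
      PySem.List.pyRange_one_eq_nil (le_of_lt (not_le.mp hn))
    unfold create_sequence_matrix create_sequence_matrix_alt
    simp [he]
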